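-- pv_equiv track=rewrite | github.com/mjepronk/euler-python | problem344_wip.py | calculate_number_of_moves
-- ===== SOURCE A (Python) =====
-- X_EMPTY       = 0
--
-- def calculate_number_of_moves(strip):
--     """"
--     Calculate how many moves we can make with each coin
--
--     We calculate the number of moves every coin can make.
--     Pocketing the coin is a seperate move.
--
--     >>> calculate_number_of_moves([1, 0, 2, 1, 1, 1])
--     [1, 0, 1, 0, 0, 0]
--     >>> calculate_number_of_moves([0, 0, 0, 0, 2, 1])
--     [0, 0, 0, 0, 4, 0]
--     >>> calculate_number_of_moves([0, 1, 0, 0, 0, 2])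
--     [0, 1, 0, 0, 0, 3]
--     """
--     list_number_of_moves = []
--     empty_since = None
--
--     for i, x in enumerate(strip):
--         number_of_moves = 0
--         if x != X_EMPTY:
--             if i == 0:
--                 # Special move
--                 number_of_moves = 1
--             elif empty_since is not None:
--                 # Check how many moves to left are possible
--                 number_of_moves = (empty_since - i) * -1
--             empty_since = None
--         else:
--             # This position is empty, mark it
--             if empty_since is None:
--                 empty_since = i
--         list_number_of_moves.append(number_of_moves)
--     return list_number_of_moves
-- ===== SOURCE B (Python) =====
-- def calculate_number_of_moves(strip):
--     coins = [i for i, x in enumerate(strip) if x != 0]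
--     result = [0] * len(strip)
--     prev = None
--     for p in coins:
--         if prev is None:
--             result[p] = 1 if p == 0 else p
--         else:
--             result[p] = p - prev - 1
--         prev = p
--     return result
-- ===== Notes on version B (the rewrite author's own statement) =====
-- stated objective: alternative
-- what changed: Replaces the single stateful scan (running empty_since marker updated per cell) with two passes: extract the coin indices, then fill a zero-initialised result from pairwise gaps between consecutive coin indices.
import Mathlib
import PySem

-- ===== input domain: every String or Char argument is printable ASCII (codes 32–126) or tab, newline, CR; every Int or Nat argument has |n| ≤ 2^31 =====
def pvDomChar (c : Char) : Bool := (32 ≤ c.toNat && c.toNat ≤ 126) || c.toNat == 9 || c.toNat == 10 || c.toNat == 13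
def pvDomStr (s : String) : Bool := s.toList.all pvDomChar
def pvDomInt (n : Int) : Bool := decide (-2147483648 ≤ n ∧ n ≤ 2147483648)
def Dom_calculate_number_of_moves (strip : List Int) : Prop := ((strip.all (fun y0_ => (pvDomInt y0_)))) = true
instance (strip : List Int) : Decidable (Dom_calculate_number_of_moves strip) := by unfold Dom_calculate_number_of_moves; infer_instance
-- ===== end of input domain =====

-- B replaces A's single stateful scan (a running empty_since marker) with two passes:
-- extract coin indices, then fill a zero list from pairwise gaps (alternative decomposition, same cost).

-- ===== PORT A =====
-- literal port: one pass over enumerate(strip) carrying (output list, empty_since : Option Int)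
def calculate_number_of_moves (strip : List Int) : List Int :=
  ((PySem.List.enumerate strip 0).foldl
    (fun (st : List Int × Option Int) (p : Int × Int) =>
      if p.2 ≠ 0 then
        let n : Int :=
          if p.1 = 0 then 1
          else match st.2 with
            | some e => (e - p.1) * (-1)
            | none => 0
        (st.1 ++ [n], none)
      else
        (st.1 ++ [(0 : Int)], if st.2 = none then some p.1 else st.2))
    ([], none)).1

-- ===== PORT B =====
-- literal port of Source B: coin-index extraction, then pairwise-gap fill into a zero list
def calculate_number_of_moves_alt (strip : List Int) : List Int :=
  let coins := ((PySem.List.enumerate strip 0).filter (fun p => p.2 != 0)).map (fun p => p.1)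
  (coins.foldl
    (fun (st : List Int × Option Int) (p : Int) =>
      let v : Int :=
        match st.2 with
        | none => if p = 0 then 1 else p
        | some q => p - q - 1
      (PySem.List.pySetD st.1 p v, some p))
    (List.replicate strip.length 0, none)).1

-- ===== PRECONDITION & SPEC =====
def Spec_calculate_number_of_moves (strip : List Int) (out : List Int) : Prop := out = calculate_number_of_moves_alt strip
instance (strip : List Int) (out : List Int) : Decidable (Spec_calculate_number_of_moves strip out) := by unfold Spec_calculate_number_of_moves; infer_instance

-- ===== CLAIM (what is proved, stated in full; the proofs are below) =====
def Claim_equal_calculate_number_of_moves : Prop := ∀ (strip : List Int), Dom_calculate_number_of_moves strip → Spec_calculate_number_of_moves strip (calculate_number_of_moves strip)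

-- ===== LEMMAS AND PROOFS =====

-- common reference recursion: A's loop written structurally
def aGo : List Int → Int → Option Int → List Int
  | [], _, _ => []
  | x :: rest, i, es =>
    if x ≠ 0 then
      (if i = 0 then (1 : Int)
       else match es with
         | some e => (e - i) * (-1)
         | none => 0) :: aGo rest (i + 1) none
    else
      (0 : Int) :: aGo rest (i + 1) (if es = none then some i else es)

-- the empty_since value determined by the position i and the last coin index prev
def esOf (i : Int) (prev : Option Int) : Option Int :=
  if i = 0 then none
  else match prev with
    | none => some 0
    | some q => if q + 1 = i then none else some (q + 1)

theorem aFold_eq_aGo (rest : List Int) (i : Int) (es : Option Int) (acc : List Int) :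
    ((PySem.List.enumerate rest i).foldl
      (fun (st : List Int × Option Int) (p : Int × Int) =>
        if p.2 ≠ 0 then
          let n : Int :=
            if p.1 = 0 then 1
            else match st.2 with
              | some e => (e - p.1) * (-1)
              | none => 0
          (st.1 ++ [n], none)
        else
          (st.1 ++ [(0 : Int)], if st.2 = none then some p.1 else st.2))
      (acc, es)).1 = acc ++ aGo rest i es := by
  induction rest generalizing i es acc with
  | nil => simp [PySem.List.enumerate_nil, aGo]
  | cons x rest ih =>
    rw [PySem.List.enumerate_cons]
    by_cases hx : x ≠ 0
    · simp only [List.foldl_cons, aGo, if_pos hx]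
      rw [ih]
      simp
    · simp only [List.foldl_cons, aGo, hx]
      rw [ih]
      simp

theorem take_succ_set (xs : List Int) (n : Nat) (v : Int) (h : n < xs.length) :
    (xs.set n v).take (n + 1) = xs.take n ++ [v] := by
  rw [List.take_add_one]
  simp [List.take_set, List.getElem?_set_self (by simpa using h),
    List.set_eq_of_length_le (by simp : (List.take n xs).length ≤ n)]

theorem bFold_eq_aGo (rest : List Int) (i : Int) (prev : Option Int) (res : List Int)
    (hi : 0 ≤ i)
    (hlen : res.length = i.toNat + rest.length)
    (hdrop : res.drop i.toNat = List.replicate rest.length 0)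
    (hprev : ∀ q, prev = some q → 0 ≤ q ∧ q < i) :
    ((((PySem.List.enumerate rest i).filter (fun p => p.2 != 0)).map (fun p => p.1)).foldl
      (fun (st : List Int × Option Int) (p : Int) =>
        let v : Int :=
          match st.2 with
          | none => if p = 0 then 1 else p
          | some q => p - q - 1
        (PySem.List.pySetD st.1 p v, some p))
      (res, prev)).1 = res.take i.toNat ++ aGo rest i (esOf i prev) := by
  induction rest generalizing i prev res with
  | nil =>
    simp [PySem.List.enumerate_nil, aGo]
    have := List.take_append_drop i.toNat res
    rw [hdrop] at this
    simpa using this.symm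
  | cons x rest ih =>
    simp only [List.length_cons] at hlen hdrop
    have hi1 : (0:Int) ≤ i + 1 := by omega
    have hit : (i + 1).toNat = i.toNat + 1 := by omega
    have hlt : i.toNat < res.length := by omega
    have hres_i : res[i.toNat]'hlt = 0 := by
      have h0 : (res.drop i.toNat)[0]? = some 0 := by
        rw [hdrop]; simp
      rw [List.getElem?_drop] at h0
      have h1 : res[i.toNat + 0]? = some 0 := h0
      simp only [Nat.add_zero, List.getElem?_eq_getElem hlt, Option.some_inj] at h1
      exact h1
    have hdrop1 : res.drop (i.toNat + 1) = List.replicate rest.length 0 := by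
      have : res.drop (i.toNat + 1) = (res.drop i.toNat).drop 1 := by
        rw [List.drop_drop]
      rw [this, hdrop]
      cases rest <;> simp
    rw [PySem.List.enumerate_cons]
    by_cases hx : x ≠ 0
    · -- coin at index i
      simp only [List.filter_cons, show ((x != 0) = true) from by simpa using hx,
        if_true, List.map_cons, List.foldl_cons]
      rw [PySem.List.pySetD_of_nonneg _ _ hi]
      have hL : ∀ w : Int, (res.set i.toNat w).length = (i+1).toNat + rest.length := by
        intro w; rw [List.length_set]; omega
      have hD : ∀ w : Int, (res.set i.toNat w).drop (i+1).toNat = List.replicate rest.length 0 := by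
        intro w
        rw [hit, List.drop_set_of_lt (by omega)]
        exact hdrop1
      rw [ih (i + 1) (some i) _ hi1 (hL _) (hD _)
        (by intro q hq; cases hq; constructor <;> omega)]
      rw [hit, take_succ_set _ _ _ hlt]
      simp only [aGo, if_pos hx, List.append_assoc, List.cons_append, List.nil_append]
      congr 2
      · -- the written value coincides
        rcases prev with _ | q
        · simp only [esOf]
          by_cases h0 : i = 0
          · simp [h0]
          · simp [h0]
        · have hq := hprev q rfl
          have hne : ¬ i = 0 := by omega
          simp only [esOf, if_neg hne]
          by_cases he : q + 1 = i
          · simp [he]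
            omega
          · simp [he]
            omega
      · -- empty_since after a coin is none
        congr 1
        simp [esOf]
    · -- empty cell at index i
      rw [not_not] at hx
      subst hx
      simp only [List.filter_cons, show (((0:Int) != 0) = true) = False from by simp,
        if_false]
      have hL : res.length = (i+1).toNat + rest.length := by omega
      have hD : res.drop (i+1).toNat = List.replicate rest.length 0 := by
        rw [hit]; exact hdrop1
      rw [ih (i + 1) prev res hi1 hL hD
        (by intro q hq; have := hprev q hq; constructor <;> omega)]
      rw [hit, List.take_add_one,
        List.getElem?_eq_getElem hlt, hres_i]
      simp only [aGo, if_neg (show ¬ ((0:Int) ≠ 0) by simp), List.append_assoc,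
        List.cons_append, List.nil_append, Option.toList]
      congr 2
      -- (if esOf i prev = none then some i else esOf i prev) = esOf (i+1) prev
      rcases prev with _ | q
      · have hne1 : ¬ i + 1 = 0 := by omega
        by_cases h0 : i = 0 <;> simp [esOf, h0, hne1]
      · have hq := hprev q rfl
        have hne : ¬ i = 0 := by omega
        have hne1 : ¬ i + 1 = 0 := by omega
        simp only [esOf, if_neg hne, if_neg hne1]
        by_cases he : q + 1 = i
        · simp [he]
        · have : ¬ q + 1 = i + 1 := by omega
          simp [he, this]

-- ===== VERDICT (by name: the statement is the Claim_ definition above) =====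
theorem calculate_number_of_moves_spec : Claim_equal_calculate_number_of_moves := by
  intro strip _
  unfold Spec_calculate_number_of_moves calculate_number_of_moves calculate_number_of_moves_alt
  rw [aFold_eq_aGo]
  rw [bFold_eq_aGo strip 0 none (List.replicate strip.length 0) le_rfl
    (by simp) (by simp) (by intro q hq; cases hq)]
  simp [esOf]
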